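-- pv_equiv track=rewrite | github.com/trvslhlt/sweetword-analyser | src/util/string_descriptions.py | isAscendingDigitSequence
-- ===== SOURCE A (Python) =====
-- def isAscendingDigitSequence(t):
--     if len(t) <= 1:
--         return False
--     ints = [int(c) for c in t]
--     for n in range(0, len(ints) - 2):
--         if (ints[n + 1] - ints[n]) is not 1:
--             return False
--     return True
-- ===== SOURCE B (Python) =====
-- def isAscendingDigitSequence(t):
--     if len(t) <= 1:
--         return False
--     ints = [int(c) for c in t]
--     return ints == list(range(ints[0], ints[0] + len(ints)))
-- ===== Notes on version B (the rewrite author's own statement) =====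
-- stated objective: simpler
-- what changed: Instead of A's index loop over pairwise differences (which stops two short and never checks the last pair), B builds the expected arithmetic run range(ints[0], ints[0]+len) once and compares it to the digit list, checking every position.
-- intended difference: On digit strings of length >= 2 whose first len-1 digits ascend by 1 but whose last digit does not continue the run (e.g. '13', '91', '120'), A returns True because its loop range(0, len-2) never checks the final pair; B returns False, which is the intended answer for an ascending digit sequence. — e.g. on isAscendingDigitSequence("13"): A returns true, B returns false
import Mathlib
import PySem

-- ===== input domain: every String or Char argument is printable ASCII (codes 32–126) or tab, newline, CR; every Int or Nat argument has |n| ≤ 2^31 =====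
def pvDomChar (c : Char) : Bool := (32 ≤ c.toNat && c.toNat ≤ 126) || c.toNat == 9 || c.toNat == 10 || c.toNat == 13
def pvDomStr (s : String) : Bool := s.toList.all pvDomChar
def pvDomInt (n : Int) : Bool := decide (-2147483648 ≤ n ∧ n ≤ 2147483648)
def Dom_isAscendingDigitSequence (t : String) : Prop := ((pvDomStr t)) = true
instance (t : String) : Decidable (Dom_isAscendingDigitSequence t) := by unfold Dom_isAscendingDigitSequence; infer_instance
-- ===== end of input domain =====

-- B replaces A's pairwise-difference index loop by building the expected arithmetic run once and
-- comparing lists; B also checks the LAST digit pair, which A's loop bound skips (see D_ below).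

-- ===== PORT A =====
-- int(c) for a digit character c (Pre_ excludes non-digit characters in strings of length ≥ 2,
-- where Python's int() raises ValueError)
def pvCharInt (c : Char) : Int := (c.toNat : Int) - 48

-- the 'for n in range(0, len(ints) - 2): if … return False' loop
def pvALoop (ints : List Int) : List Int → Bool
  | [] => true
  | n :: rest =>
    if PySem.List.pyGetD ints (n + 1) 0 - PySem.List.pyGetD ints n 0 ≠ 1 then false
    else pvALoop ints rest

def isAscendingDigitSequence (t : String) : Bool :=
  if PySem.Str.len t ≤ 1 then false
  else
    let ints := t.toList.map pvCharInt
    pvALoop ints (PySem.List.pyRange 0 (PySem.List.len ints - 2) 1)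

-- ===== PORT B =====
def isAscendingDigitSequence_alt (t : String) : Bool :=
  if PySem.Str.len t ≤ 1 then false
  else
    let ints := t.toList.map pvCharInt
    ints == PySem.List.pyRange (PySem.List.pyGetD ints 0 0)
        (PySem.List.pyGetD ints 0 0 + PySem.List.len ints) 1

-- ===== PRECONDITION & SPEC =====
-- Pre_ excludes exactly the strings of length ≥ 2 containing a non-digit character: there
-- Python's int(c) raises ValueError, in A and in B alike.
def Pre_isAscendingDigitSequence (t : String) : Prop :=
  t.toList.length ≤ 1 ∨ t.toList.all Char.isDigit = true

instance (t : String) : Decidable (Pre_isAscendingDigitSequence t) := by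
  unfold Pre_isAscendingDigitSequence; infer_instance

def pvWitness_isAscendingDigitSequence : String := "123"

-- On digit strings of length ≥ 2 whose first len-1 digits ascend by 1 but whose last digit does
-- not continue the run (e.g. "13", "91", "120"), A returns true because its loop range(0, len-2)
-- never checks the final pair; B returns false, the intended answer for an ascending digit sequence.
def D_isAscendingDigitSequence (t : String) : Prop :=
  2 ≤ t.toList.length ∧ t.toList.all Char.isDigit = true ∧
  (∀ i, i < t.toList.length - 2 → (t.toList[i + 1]!).toNat = (t.toList[i]!).toNat + 1) ∧
  ¬ ((t.toList[t.toList.length - 1]!).toNat = (t.toList[t.toList.length - 2]!).toNat + 1)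

instance (t : String) : Decidable (D_isAscendingDigitSequence t) := by
  unfold D_isAscendingDigitSequence; infer_instance

def Spec_isAscendingDigitSequence (t : String) (out : Bool) : Prop :=
  ¬ D_isAscendingDigitSequence t → out = isAscendingDigitSequence_alt t

instance (t : String) (out : Bool) : Decidable (Spec_isAscendingDigitSequence t out) := by
  unfold Spec_isAscendingDigitSequence; infer_instance

def pvDiffWitness_isAscendingDigitSequence : String := "13"
def pvDiffWitnessOut_isAscendingDigitSequence : Bool × Bool := (true, false)

-- ===== CLAIM (what is proved, stated in full; the proofs are below) =====
def Claim_unchanged_isAscendingDigitSequence : Prop := ∀ (t : String), Dom_isAscendingDigitSequence t → Pre_isAscendingDigitSequence t → Spec_isAscendingDigitSequence t (isAscendingDigitSequence t)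
def Claim_changed_isAscendingDigitSequence : Prop := Dom_isAscendingDigitSequence (pvDiffWitness_isAscendingDigitSequence) ∧ Pre_isAscendingDigitSequence (pvDiffWitness_isAscendingDigitSequence) ∧ D_isAscendingDigitSequence (pvDiffWitness_isAscendingDigitSequence) ∧ isAscendingDigitSequence (pvDiffWitness_isAscendingDigitSequence) = pvDiffWitnessOut_isAscendingDigitSequence.1 ∧ isAscendingDigitSequence_alt (pvDiffWitness_isAscendingDigitSequence) = pvDiffWitnessOut_isAscendingDigitSequence.2 ∧ pvDiffWitnessOut_isAscendingDigitSequence.1 ≠ pvDiffWitnessOut_isAscendingDigitSequence.2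
def Claim_exact_isAscendingDigitSequence : Prop := ∀ (t : String), Dom_isAscendingDigitSequence t → Pre_isAscendingDigitSequence t → D_isAscendingDigitSequence t → isAscendingDigitSequence t ≠ isAscendingDigitSequence_alt t

-- ===== LEMMAS AND PROOFS =====

-- A's loop over range(s, e) succeeds iff every checked pairwise difference is 1
theorem pvALoop_iff (l : List Int) (s e : Int) :
    pvALoop l (PySem.List.pyRange s e 1) = true ↔
      ∀ k : Int, s ≤ k → k < e →
        PySem.List.pyGetD l (k + 1) 0 - PySem.List.pyGetD l k 0 = 1 := by
  by_cases h : e ≤ s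
  · rw [PySem.List.pyRange_one_eq_nil h]
    simp only [pvALoop]
    constructor
    · intro _ k hk1 hk2; omega
    · intro _; trivial
  · rw [not_le] at h
    generalize hm : (e - s).toNat = m
    induction m generalizing s with
    | zero => omega
    | succ m ih =>
      rw [PySem.List.pyRange_one_cons h]
      simp only [pvALoop]
      split_ifs with hc
      · simp only [false_iff]
        intro hall
        exact hc (hall s le_rfl h)
      · rw [ne_eq, not_not] at hc
        by_cases h2 : e ≤ s + 1
        · rw [PySem.List.pyRange_one_eq_nil h2]
          simp only [pvALoop, true_iff]
          intro k hk1 hk2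
          have : k = s := by omega
          subst this; exact hc
        · rw [not_le] at h2
          have ih' := ih (s + 1) (by omega) (by omega)
          rw [ih']
          constructor
          · intro hall k hk1 hk2
            rcases eq_or_lt_of_le hk1 with rfl | hlt
            · exact hc
            · exact hall k (by omega) hk2
          · intro hall k hk1 hk2; exact hall k (by omega) hk2

-- B's list equality with the arithmetic run, by indices
theorem pvRun_iff_forall (l : List Int) (a : Int) :
    (l = PySem.List.pyRange a (a + (l.length : Int)) 1) ↔
      ∀ i : Nat, i < l.length → l.getD i 0 = a + i := by
  constructor
  · intro hEq i hi
    have h1 := congrArg (fun xs => List.getD xs i 0) hEq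
    simp only at h1
    rw [h1, List.getD_eq_getElem _ 0 (by rw [PySem.List.length_pyRange_one]; omega),
       PySem.List.getElem_pyRange_one]
  · intro hAll
    apply List.ext_getElem
    · rw [PySem.List.length_pyRange_one]; omega
    · intro i hi1 hi2
      rw [PySem.List.getElem_pyRange_one, ← List.getD_eq_getElem l 0 hi1]
      exact hAll i hi1

-- a list is the run starting at its own head iff consecutive elements differ by 1
theorem pvForall_iff_steps (l : List Int) (a : Int) (ha : l.getD 0 0 = a) :
    (∀ i : Nat, i < l.length → l.getD i 0 = a + i) ↔
      ∀ i : Nat, i + 1 < l.length → l.getD (i + 1) 0 = l.getD i 0 + 1 := by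
  constructor
  · intro h i hi
    rw [h (i + 1) hi, h i (by omega)]; push_cast; ring
  · intro h i hi
    induction i with
    | zero => simpa using ha
    | succ n ihn =>
      rw [h n hi, ihn (by omega)]; push_cast; ring

-- a pairwise condition on the mapped int list, read back on the characters
theorem pvStep_char (c : List Char) (i j : Nat) (hi : i < c.length) (hj : j < c.length) :
    ((c.map pvCharInt).getD j 0 = (c.map pvCharInt).getD i 0 + 1) ↔
      (getElem! c j).toNat = (getElem! c i).toNat + 1 := by
  rw [List.getD_eq_getElem _ 0 (by simpa using hj), List.getD_eq_getElem _ 0 (by simpa using hi),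
     List.getElem_map, List.getElem_map, getElem!_pos c j hj, getElem!_pos c i hi]
  unfold pvCharInt
  omega

-- characterisation of port A on strings of length ≥ 2
theorem pvA_true_iff (t : String) (h2 : 2 ≤ t.toList.length) :
    isAscendingDigitSequence t = true ↔
      ∀ i : Nat, i + 2 < t.toList.length →
        (t.toList[i + 1]!).toNat = (t.toList[i]!).toNat + 1 := by
  unfold isAscendingDigitSequence
  simp only [PySem.Str.len_eq, PySem.List.len_eq]
  rw [if_neg (by omega), pvALoop_iff]
  constructor
  · intro h i hi
    have h' := h (i : Int) (by omega) (by simp only [List.length_map]; omega)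
    rw [show ((i : Int) + 1) = ((i + 1 : Nat) : Int) by omega,
       PySem.List.pyGetD_natCast, PySem.List.pyGetD_natCast] at h'
    exact (pvStep_char t.toList i (i + 1) (by omega) (by omega)).mp (by omega)
  · intro h k hk0 hk2
    simp only [List.length_map] at hk2
    have hkn : k = ((k.toNat : Nat) : Int) := by omega
    rw [hkn, show ((k.toNat : Int) + 1) = ((k.toNat + 1 : Nat) : Int) by omega,
       PySem.List.pyGetD_natCast, PySem.List.pyGetD_natCast]
    have := (pvStep_char t.toList k.toNat (k.toNat + 1) (by omega) (by omega)).mpr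
      (h k.toNat (by omega))
    omega

-- characterisation of port B on strings of length ≥ 2
theorem pvB_true_iff (t : String) (h2 : 2 ≤ t.toList.length) :
    isAscendingDigitSequence_alt t = true ↔
      ∀ i : Nat, i + 1 < t.toList.length →
        (t.toList[i + 1]!).toNat = (t.toList[i]!).toNat + 1 := by
  unfold isAscendingDigitSequence_alt
  simp only [PySem.Str.len_eq, PySem.List.len_eq]
  rw [if_neg (by omega), PySem.List.pyGetD_zero, beq_iff_eq, pvRun_iff_forall,
     pvForall_iff_steps _ _ rfl]
  constructor
  · intro h i hi
    exact (pvStep_char t.toList i (i + 1) (by omega) (by omega)).mp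
      (h i (by simp only [List.length_map]; omega))
  · intro h i hi
    simp only [List.length_map] at hi
    exact (pvStep_char t.toList i (i + 1) (by omega) (by omega)).mpr (h i hi)

-- ===== VERDICT (by name: the statements are the Claim_ definitions above) =====
theorem isAscendingDigitSequence_spec : Claim_unchanged_isAscendingDigitSequence := by
  intro t _ hPre hnD
  by_cases hL : t.toList.length ≤ 1
  · unfold isAscendingDigitSequence isAscendingDigitSequence_alt
    simp only [PySem.Str.len_eq]
    rw [if_pos (by omega), if_pos (by omega)]
  · have h2 : 2 ≤ t.toList.length := by omega
    have hdig := hPre.resolve_left (by omega)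
    rw [Bool.eq_iff_iff, pvA_true_iff t h2, pvB_true_iff t h2]
    constructor
    · intro h i hi
      by_cases hi2 : i + 2 < t.toList.length
      · exact h i hi2
      · have hieq : i = t.toList.length - 2 := by omega
        subst hieq
        by_contra hbad
        apply hnD
        refine ⟨h2, hdig, fun j hj => h j (by omega), ?_⟩
        rw [show t.toList.length - 2 + 1 = t.toList.length - 1 from by omega] at hbad
        exact hbad
    · intro h i hi
      exact h i (by omega)

set_option maxRecDepth 4096 in
theorem isAscendingDigitSequence_changed : Claim_changed_isAscendingDigitSequence := by
  unfold Claim_changed_isAscendingDigitSequence; decide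

theorem isAscendingDigitSequence_tight : Claim_exact_isAscendingDigitSequence := by
  intro t _ _ hD
  obtain ⟨h2, hdig, hpre, hlast⟩ := hD
  have hA : isAscendingDigitSequence t = true := by
    rw [pvA_true_iff t h2]
    intro i hi
    exact hpre i (by omega)
  have hB : ¬ (isAscendingDigitSequence_alt t = true) := by
    rw [pvB_true_iff t h2]
    intro hall
    have hstep := hall (t.toList.length - 2) (by omega)
    rw [show t.toList.length - 2 + 1 = t.toList.length - 1 from by omega] at hstep
    exact hlast hstep
  intro he
  rw [hA] at he
  exact hB he.symm
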